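-- pv_equiv track=rewrite | github.com/TusharSaxena2005/Round-1B | document_processor.py | _generate_specific_section_title
-- ===== SOURCE A (Python) =====
-- def _generate_specific_section_title(first_sentence: str, full_para: str, doc_name: str) -> str:
--     """Generate a specific, meaningful section title from content"""
--     content_lower = full_para.lower()
--     doc_lower = doc_name.lower()
--
--     # Context-aware title generation based on document type and content
--     if 'things to do' in doc_lower or 'activities' in doc_lower:
--         if 'coastal' in content_lower or 'beach' in content_lower or 'sea' in content_lower:
--             return 'Coastal Adventures and Beach Activities'
--         elif 'nightlife' in content_lower or 'entertainment' in content_lower: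
--             return 'Nightlife and Entertainment Options'
--         elif 'water' in content_lower and ('sport' in content_lower or 'activity' in content_lower):
--             return 'Water Sports and Marine Activities'
--         elif 'cultural' in content_lower or 'museum' in content_lower:
--             return 'Cultural Attractions and Museums'
--
--     elif 'cuisine' in doc_lower or 'food' in doc_lower:
--         if 'experience' in content_lower or 'tour' in content_lower:
--             return 'Culinary Experiences and Food Tours'
--         elif 'dish' in content_lower or 'traditional' in content_lower:
--             return 'Regional Cuisine and Traditional Dishes'
--         elif 'restaurant' in content_lower or 'dining' in content_lower:
--             return 'Dining Guide and Restaurant Recommendations'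
--
--     elif 'tips' in doc_lower or 'tricks' in doc_lower:
--         if 'packing' in content_lower:
--             return 'Comprehensive Packing Guide and Travel Tips'
--         elif 'budget' in content_lower or 'money' in content_lower:
--             return 'Budget Planning and Money-Saving Tips'
--         elif 'transport' in content_lower or 'travel' in content_lower:
--             return 'Transportation and Getting Around'
--
--     elif 'cities' in doc_lower:
--         if 'attraction' in content_lower:
--             return 'Major City Attractions and Landmarks'
--         elif 'experience' in content_lower or 'local' in content_lower:
--             return 'Authentic Local Experiences and Culture'
--         elif 'artistic' in content_lower or 'art' in content_lower:
--             return 'Art Districts and Cultural Neighborhoods'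
--
--     elif 'history' in doc_lower:
--         if 'montpellier' in content_lower:
--             return 'Historical Landmarks in Montpellier'
--         elif 'aix' in content_lower or 'provence' in content_lower:
--             return 'Historical Sites in Aix-en-Provence'
--         elif 'site' in content_lower:
--             return 'Important Historical Sites and Monuments'
--
--     # Look for specific location mentions
--     locations = ['montpellier', 'marseille', 'nice', 'cannes', 'aix-en-provence', 'avignon', 'saint-tropez']
--     for location in locations:
--         if location in content_lower:
--             return f'Guide to {location.title()}'
--
--     # Extract meaningful phrases from content
--     sentences = full_para.split('.')
--     for sentence in sentences[:2]:  # Check first two sentences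
--         sentence = sentence.strip()
--         if len(sentence) > 20 and len(sentence) < 80:
--             # Clean up and use as title if it's descriptive
--             if any(word in sentence.lower() for word in ['comprehensive', 'guide', 'ultimate', 'complete']):
--                 return sentence
--
--     # Fallback: use a cleaned version of the first meaningful phrase
--     words = first_sentence.split()
--     if len(words) > 3:
--         clean_title = ' '.join(words[:8]).title()
--         return clean_title if len(clean_title) < 80 else ' '.join(words[:5]).title()
--
--     return first_sentence.title()[:50]
-- ===== SOURCE B (Python) =====
-- # Different strategy: one feature-extraction pass records which content keywords occur,
-- # a flat keyword->category map picks the document category, and declarative CNF rules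
-- # (lists of keyword-alternative clauses) are evaluated against the extracted features;
-- # the remaining stages are chained as first-hit generators.
--
-- CONTENT_KEYWORDS = [
--     'coastal', 'beach', 'sea', 'nightlife', 'entertainment', 'water', 'sport',
--     'activity', 'cultural', 'museum', 'experience', 'tour', 'dish', 'traditional',
--     'restaurant', 'dining', 'packing', 'budget', 'money', 'transport', 'travel',
--     'attraction', 'local', 'artistic', 'art', 'montpellier', 'aix', 'provence', 'site',
-- ]
--
-- # flat, ordered: first doc-name keyword found decides the category
-- DOC_CATS = [
--     ('things to do', 'activities'), ('activities', 'activities'),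
--     ('cuisine', 'food'), ('food', 'food'),
--     ('tips', 'tips'), ('tricks', 'tips'),
--     ('cities', 'cities'),
--     ('history', 'history'),
-- ]
--
-- # per category: ordered (CNF clauses, title); a rule fires when every clause
-- # contains at least one keyword present in the content
-- RULES = {
--     'activities': [
--         ([['coastal', 'beach', 'sea']], 'Coastal Adventures and Beach Activities'),
--         ([['nightlife', 'entertainment']], 'Nightlife and Entertainment Options'),
--         ([['water'], ['sport', 'activity']], 'Water Sports and Marine Activities'),
--         ([['cultural', 'museum']], 'Cultural Attractions and Museums'),
--     ],
--     'food': [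
--         ([['experience', 'tour']], 'Culinary Experiences and Food Tours'),
--         ([['dish', 'traditional']], 'Regional Cuisine and Traditional Dishes'),
--         ([['restaurant', 'dining']], 'Dining Guide and Restaurant Recommendations'),
--     ],
--     'tips': [
--         ([['packing']], 'Comprehensive Packing Guide and Travel Tips'),
--         ([['budget', 'money']], 'Budget Planning and Money-Saving Tips'),
--         ([['transport', 'travel']], 'Transportation and Getting Around'),
--     ],
--     'cities': [
--         ([['attraction']], 'Major City Attractions and Landmarks'),
--         ([['experience', 'local']], 'Authentic Local Experiences and Culture'),
--         ([['artistic', 'art']], 'Art Districts and Cultural Neighborhoods'),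
--     ],
--     'history': [
--         ([['montpellier']], 'Historical Landmarks in Montpellier'),
--         ([['aix', 'provence']], 'Historical Sites in Aix-en-Provence'),
--         ([['site']], 'Important Historical Sites and Monuments'),
--     ],
-- }
--
-- LOCATIONS = ['montpellier', 'marseille', 'nice', 'cannes', 'aix-en-provence',
--              'avignon', 'saint-tropez']
--
--
-- def _generate_specific_section_title(first_sentence: str, full_para: str, doc_name: str) -> str:
--     content_lower = full_para.lower()
--     doc_lower = doc_name.lower()
--
--     # feature extraction: which rule keywords the content mentions
--     has = {kw: (kw in content_lower) for kw in CONTENT_KEYWORDS}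
--
--     cat = next((c for kw, c in DOC_CATS if kw in doc_lower), None)
--     if cat is not None:
--         for clauses, title in RULES[cat]:
--             if all(any(has[kw] for kw in clause) for clause in clauses):
--                 return title
--
--     loc = next((l for l in LOCATIONS if l in content_lower), None)
--     if loc is not None:
--         return 'Guide to ' + loc.title()
--
--     cand = next((t for t in (s.strip() for s in full_para.split('.')[:2])
--                  if 20 < len(t) < 80
--                  and any(w in t.lower() for w in
--                          ['comprehensive', 'guide', 'ultimate', 'complete'])), None)
--     if cand is not None:
--         return cand
--
--     words = first_sentence.split()
--     if len(words) > 3: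
--         clean_title = ' '.join(words[:8]).title()
--         return clean_title if len(clean_title) < 80 else ' '.join(words[:5]).title()
--
--     return first_sentence.title()[:50]
-- ===== Notes on version B (the rewrite author's own statement) =====
-- stated objective: alternative
-- what changed: Instead of A's if/elif decision tree with inline substring tests, B runs one feature-extraction pass building a dict of which rule keywords occur in the content, picks the document category via a flat keyword-to-category map, evaluates declarative CNF rules (clause lists) against the extracted feature dict, and chains the tail stages as first-hit searches.
import Mathlib
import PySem

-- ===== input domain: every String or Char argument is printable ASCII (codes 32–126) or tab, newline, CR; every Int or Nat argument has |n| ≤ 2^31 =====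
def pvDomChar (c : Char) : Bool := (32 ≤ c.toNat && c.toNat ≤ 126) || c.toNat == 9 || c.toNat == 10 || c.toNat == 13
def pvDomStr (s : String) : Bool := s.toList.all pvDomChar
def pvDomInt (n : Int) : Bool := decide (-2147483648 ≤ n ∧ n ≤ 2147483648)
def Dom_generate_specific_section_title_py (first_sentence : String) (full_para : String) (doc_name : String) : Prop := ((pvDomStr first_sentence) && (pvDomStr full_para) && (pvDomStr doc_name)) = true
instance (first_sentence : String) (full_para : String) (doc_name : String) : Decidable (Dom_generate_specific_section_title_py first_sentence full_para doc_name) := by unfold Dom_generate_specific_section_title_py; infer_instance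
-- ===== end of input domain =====

-- B replaces A's if/elif decision tree by a feature-extraction pass (a dict recording which
-- rule keywords occur in the content), a flat keyword→category map, and declarative CNF rules
-- evaluated against the extracted features; the tail stages become first-hit searches. Objective: alternative, same cost.

-- shared primitive: Python str.title(), exact for ASCII input (cased chars there are exactly the ASCII letters)
def pvTitleChars : List Char → Bool → List Char
  | [], _ => []
  | c :: cs, prevAlpha =>
      (if PySem.Chars.isalpha c then
        (if prevAlpha then PySem.Chars.lowerChar c else PySem.Chars.upperChar c)
       else c) :: pvTitleChars cs (PySem.Chars.isalpha c)

def pvTitleStr (s : String) : String := String.ofList (pvTitleChars s.toList false)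

-- ===== PORT A =====
-- the location loop
def aLocLoop : List String → String → Option String
  | [], _ => none
  | l :: ls, cl =>
      if PySem.Str.isIn l cl then some ("Guide to " ++ pvTitleStr l) else aLocLoop ls cl

-- the first-two-sentences scan
def aSentScan : List String → Option String
  | [] => none
  | s :: ss =>
      let t := PySem.Str.strip s
      if (decide (20 < PySem.Chars.len t.toList) && decide (PySem.Chars.len t.toList < 80)) &&
         (["comprehensive", "guide", "ultimate", "complete"].any
            (fun w => PySem.Str.isIn w (PySem.Str.lower t))) then some t
      else aSentScan ss

-- the word-based fallbacks
def aWordFallback (first_sentence : String) : String :=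
  let words := PySem.Str.split₀ first_sentence
  if words.length > 3 then
    let clean_title := pvTitleStr (PySem.Str.join " " (PySem.List.slice words none (some 8)))
    if PySem.Chars.len clean_title.toList < 80 then clean_title
    else pvTitleStr (PySem.Str.join " " (PySem.List.slice words none (some 5)))
  else String.ofList (PySem.List.slice (pvTitleChars first_sentence.toList false) none (some 50))

def aTail (first_sentence : String) (full_para : String) (content_lower : String) : String :=
  match aLocLoop ["montpellier", "marseille", "nice", "cannes", "aix-en-provence", "avignon", "saint-tropez"] content_lower with
  | some t => t
  | none =>
    match aSentScan (PySem.List.slice ((PySem.Str.split? full_para ".").getD []) none (some 2)) with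
    | some t => t
    | none => aWordFallback first_sentence

def generate_specific_section_title_py (first_sentence : String) (full_para : String) (doc_name : String) : String :=
  let cl := PySem.Str.lower full_para
  let dl := PySem.Str.lower doc_name
  if PySem.Str.isIn "things to do" dl || PySem.Str.isIn "activities" dl then
    if PySem.Str.isIn "coastal" cl || PySem.Str.isIn "beach" cl || PySem.Str.isIn "sea" cl then
      "Coastal Adventures and Beach Activities"
    else if PySem.Str.isIn "nightlife" cl || PySem.Str.isIn "entertainment" cl then
      "Nightlife and Entertainment Options"
    else if PySem.Str.isIn "water" cl && (PySem.Str.isIn "sport" cl || PySem.Str.isIn "activity" cl) then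
      "Water Sports and Marine Activities"
    else if PySem.Str.isIn "cultural" cl || PySem.Str.isIn "museum" cl then
      "Cultural Attractions and Museums"
    else aTail first_sentence full_para cl
  else if PySem.Str.isIn "cuisine" dl || PySem.Str.isIn "food" dl then
    if PySem.Str.isIn "experience" cl || PySem.Str.isIn "tour" cl then
      "Culinary Experiences and Food Tours"
    else if PySem.Str.isIn "dish" cl || PySem.Str.isIn "traditional" cl then
      "Regional Cuisine and Traditional Dishes"
    else if PySem.Str.isIn "restaurant" cl || PySem.Str.isIn "dining" cl then
      "Dining Guide and Restaurant Recommendations"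
    else aTail first_sentence full_para cl
  else if PySem.Str.isIn "tips" dl || PySem.Str.isIn "tricks" dl then
    if PySem.Str.isIn "packing" cl then
      "Comprehensive Packing Guide and Travel Tips"
    else if PySem.Str.isIn "budget" cl || PySem.Str.isIn "money" cl then
      "Budget Planning and Money-Saving Tips"
    else if PySem.Str.isIn "transport" cl || PySem.Str.isIn "travel" cl then
      "Transportation and Getting Around"
    else aTail first_sentence full_para cl
  else if PySem.Str.isIn "cities" dl then
    if PySem.Str.isIn "attraction" cl then
      "Major City Attractions and Landmarks"
    else if PySem.Str.isIn "experience" cl || PySem.Str.isIn "local" cl then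
      "Authentic Local Experiences and Culture"
    else if PySem.Str.isIn "artistic" cl || PySem.Str.isIn "art" cl then
      "Art Districts and Cultural Neighborhoods"
    else aTail first_sentence full_para cl
  else if PySem.Str.isIn "history" dl then
    if PySem.Str.isIn "montpellier" cl then
      "Historical Landmarks in Montpellier"
    else if PySem.Str.isIn "aix" cl || PySem.Str.isIn "provence" cl then
      "Historical Sites in Aix-en-Provence"
    else if PySem.Str.isIn "site" cl then
      "Important Historical Sites and Monuments"
    else aTail first_sentence full_para cl
  else aTail first_sentence full_para cl

-- ===== PORT B =====
-- every keyword the CNF rules mention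
def pvContentKeywords : List String :=
  ["coastal", "beach", "sea", "nightlife", "entertainment", "water", "sport",
   "activity", "cultural", "museum", "experience", "tour", "dish", "traditional",
   "restaurant", "dining", "packing", "budget", "money", "transport", "travel",
   "attraction", "local", "artistic", "art", "montpellier", "aix", "provence", "site"]

-- flat, ordered keyword→category map
def pvDocCats : List (String × String) :=
  [("things to do", "activities"), ("activities", "activities"),
   ("cuisine", "food"), ("food", "food"),
   ("tips", "tips"), ("tricks", "tips"),
   ("cities", "cities"),
   ("history", "history")]

-- per category: ordered (CNF clauses, title)
def pvRules : PySem.Dict String (List (List (List String) × String)) :=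
  PySem.Dict.ofList
    [ ("activities",
        [ ([["coastal", "beach", "sea"]], "Coastal Adventures and Beach Activities"),
          ([["nightlife", "entertainment"]], "Nightlife and Entertainment Options"),
          ([["water"], ["sport", "activity"]], "Water Sports and Marine Activities"),
          ([["cultural", "museum"]], "Cultural Attractions and Museums") ]),
      ("food",
        [ ([["experience", "tour"]], "Culinary Experiences and Food Tours"),
          ([["dish", "traditional"]], "Regional Cuisine and Traditional Dishes"),
          ([["restaurant", "dining"]], "Dining Guide and Restaurant Recommendations") ]),
      ("tips",
        [ ([["packing"]], "Comprehensive Packing Guide and Travel Tips"),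
          ([["budget", "money"]], "Budget Planning and Money-Saving Tips"),
          ([["transport", "travel"]], "Transportation and Getting Around") ]),
      ("cities",
        [ ([["attraction"]], "Major City Attractions and Landmarks"),
          ([["experience", "local"]], "Authentic Local Experiences and Culture"),
          ([["artistic", "art"]], "Art Districts and Cultural Neighborhoods") ]),
      ("history",
        [ ([["montpellier"]], "Historical Landmarks in Montpellier"),
          ([["aix", "provence"]], "Historical Sites in Aix-en-Provence"),
          ([["site"]], "Important Historical Sites and Monuments") ]) ]

def pvLocations : List String :=
  ["montpellier", "marseille", "nice", "cannes", "aix-en-provence", "avignon", "saint-tropez"]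

-- feature extraction: the dict comprehension {kw: kw in content_lower for kw in CONTENT_KEYWORDS}
def pvFeatures (cl : String) : PySem.Dict String Bool :=
  pvContentKeywords.foldl (fun d kw => d.insert kw (PySem.Str.isIn kw cl)) PySem.Dict.empty

-- first rule whose CNF clauses are all satisfied by the extracted features
-- (has[kw] ported as getD … false; every rule keyword is a key of the features dict, so the
--  default is unreachable — Python's subscript cannot raise here)
def pvFireRules : List (List (List String) × String) → PySem.Dict String Bool → Option String
  | [], _ => none
  | (clauses, t) :: rs, has =>
      if clauses.all (fun clause => clause.any (fun kw => has.getD kw false)) then some t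
      else pvFireRules rs has

-- the word-based fallbacks (same final step as A)
def bWordFallback (first_sentence : String) : String :=
  let words := PySem.Str.split₀ first_sentence
  if words.length > 3 then
    let clean_title := pvTitleStr (PySem.Str.join " " (PySem.List.slice words none (some 8)))
    if PySem.Chars.len clean_title.toList < 80 then clean_title
    else pvTitleStr (PySem.Str.join " " (PySem.List.slice words none (some 5)))
  else String.ofList (PySem.List.slice (pvTitleChars first_sentence.toList false) none (some 50))

-- the three tail stages, each a first-hit search chained on Option
def bTail (first_sentence : String) (full_para : String) (content_lower : String) : String :=
  ((pvLocations.find? (fun l => PySem.Str.isIn l content_lower)).map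
      (fun l => "Guide to " ++ pvTitleStr l)).getD
    ((((PySem.List.slice ((PySem.Str.split? full_para ".").getD []) none (some 2)).map
         PySem.Str.strip).find?
        (fun t => (decide (20 < PySem.Chars.len t.toList) && decide (PySem.Chars.len t.toList < 80)) &&
           (["comprehensive", "guide", "ultimate", "complete"].any
              (fun w => PySem.Str.isIn w (PySem.Str.lower t))))).getD
      (bWordFallback first_sentence))

def generate_specific_section_title_py_alt (first_sentence : String) (full_para : String) (doc_name : String) : String :=
  let cl := PySem.Str.lower full_para
  let dl := PySem.Str.lower doc_name
  let has := pvFeatures cl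
  let themed : Option String :=
    ((pvDocCats.find? (fun p => PySem.Str.isIn p.1 dl)).map Prod.snd).bind
      (fun cat => pvFireRules ((pvRules.get? cat).getD []) has)
  themed.getD (bTail first_sentence full_para cl)

-- ===== PRECONDITION & SPEC =====
def Spec_generate_specific_section_title_py (first_sentence : String) (full_para : String) (doc_name : String) (out : String) : Prop := out = generate_specific_section_title_py_alt first_sentence full_para doc_name
instance (first_sentence : String) (full_para : String) (doc_name : String) (out : String) : Decidable (Spec_generate_specific_section_title_py first_sentence full_para doc_name out) := by unfold Spec_generate_specific_section_title_py; infer_instance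

-- ===== CLAIM (what is proved, stated in full; the proofs are below) =====
def Claim_equal_generate_specific_section_title_py : Prop := ∀ (first_sentence : String) (full_para : String) (doc_name : String), Dom_generate_specific_section_title_py first_sentence full_para doc_name → Spec_generate_specific_section_title_py first_sentence full_para doc_name (generate_specific_section_title_py first_sentence full_para doc_name)

-- ===== LEMMAS AND PROOFS =====
theorem getD_foldl_ins_of_not_mem (l : List String) (cl : String) (d : PySem.Dict String Bool)
    (kw : String) (h : kw ∉ l) :
    (l.foldl (fun d k => d.insert k (PySem.Str.isIn k cl)) d).getD kw false = d.getD kw false := by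
  induction l generalizing d with
  | nil => rfl
  | cons a l ih =>
      simp only [List.mem_cons, not_or] at h
      rw [List.foldl_cons, ih _ h.2, PySem.Dict.getD_insert]
      simp [h.1]

theorem getD_features_gen (cl kw : String) (l : List String) (d : PySem.Dict String Bool)
    (h : kw ∈ l) :
    (l.foldl (fun d k => d.insert k (PySem.Str.isIn k cl)) d).getD kw false = PySem.Str.isIn kw cl := by
  induction l generalizing d with
  | nil => cases h
  | cons a l ih =>
      rw [List.foldl_cons]
      by_cases hm : kw ∈ l
      · exact ih _ hm
      · have hka : kw = a := (List.mem_cons.1 h).resolve_right hm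
        subst hka
        rw [getD_foldl_ins_of_not_mem _ _ _ _ hm, PySem.Dict.getD_insert_self]

theorem getD_features (cl kw : String) (h : kw ∈ pvContentKeywords) :
    (pvFeatures cl).getD kw false = PySem.Str.isIn kw cl :=
  getD_features_gen cl kw _ _ h
theorem aLocLoop_eq_find (ls : List String) (cl : String) :
    aLocLoop ls cl = (ls.find? (fun l => PySem.Str.isIn l cl)).map (fun l => "Guide to " ++ pvTitleStr l) := by
  induction ls with
  | nil => rfl
  | cons a ls ih =>
      rw [aLocLoop, List.find?_cons]
      cases h : PySem.Chars.isIn a.toList cl.toList <;>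
        simp [PySem.Str.isIn, h, ih]

theorem aSentScan_eq_find (ss : List String) :
    aSentScan ss = (ss.map PySem.Str.strip).find?
      (fun t => (decide (20 < PySem.Chars.len t.toList) && decide (PySem.Chars.len t.toList < 80)) &&
         (["comprehensive", "guide", "ultimate", "complete"].any
            (fun w => PySem.Str.isIn w (PySem.Str.lower t)))) := by
  induction ss with
  | nil => rfl
  | cons s ss ih =>
      rw [aSentScan, List.map_cons, List.find?_cons]
      cases h : ((decide (20 < PySem.Chars.len (PySem.Str.strip s).toList) &&
          decide (PySem.Chars.len (PySem.Str.strip s).toList < 80)) &&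
         (["comprehensive", "guide", "ultimate", "complete"].any
            (fun w => PySem.Str.isIn w (PySem.Str.lower (PySem.Str.strip s))))) <;>
        simp [ih]

theorem wf_eq : aWordFallback = bWordFallback := rfl

theorem tail_eq (fs fp cl : String) : aTail fs fp cl = bTail fs fp cl := by
  unfold aTail bTail pvLocations
  rw [aLocLoop_eq_find, aSentScan_eq_find, wf_eq]
  cases List.find? (fun l => PySem.Str.isIn l cl)
      ["montpellier", "marseille", "nice", "cannes", "aix-en-provence", "avignon", "saint-tropez"] with
  | some l => rfl
  | none =>
      cases List.find?
          (fun t => (decide (20 < PySem.Chars.len t.toList) && decide (PySem.Chars.len t.toList < 80)) &&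
            (["comprehensive", "guide", "ultimate", "complete"].any
               (fun w => PySem.Str.isIn w (PySem.Str.lower t))))
          (List.map PySem.Str.strip (PySem.List.slice ((PySem.Str.split? fp ".").getD []) none (some 2))) with
      | some t => rfl
      | none => rfl
theorem rules_activities : (pvRules.get? "activities").getD [] =
    [ ([["coastal", "beach", "sea"]], "Coastal Adventures and Beach Activities"),
      ([["nightlife", "entertainment"]], "Nightlife and Entertainment Options"),
      ([["water"], ["sport", "activity"]], "Water Sports and Marine Activities"),
      ([["cultural", "museum"]], "Cultural Attractions and Museums") ] := rfl

theorem branch_act (cl d : String) :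
    (pvFireRules ((pvRules.get? "activities").getD []) (pvFeatures cl)).getD d =
    (if PySem.Str.isIn "coastal" cl || PySem.Str.isIn "beach" cl || PySem.Str.isIn "sea" cl then
      "Coastal Adventures and Beach Activities"
    else if PySem.Str.isIn "nightlife" cl || PySem.Str.isIn "entertainment" cl then
      "Nightlife and Entertainment Options"
    else if PySem.Str.isIn "water" cl && (PySem.Str.isIn "sport" cl || PySem.Str.isIn "activity" cl) then
      "Water Sports and Marine Activities"
    else if PySem.Str.isIn "cultural" cl || PySem.Str.isIn "museum" cl then
      "Cultural Attractions and Museums"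
    else d) := by
  simp only [rules_activities, pvFireRules, List.all_cons, List.all_nil, List.any_cons,
    List.any_nil, Bool.and_true, Bool.or_false, Bool.or_assoc,
    getD_features, pvContentKeywords, List.mem_cons, List.not_mem_nil, String.reduceEq,
    or_false, or_true, or_true,
    apply_ite (fun o : Option String => o.getD d), Option.getD_some, Option.getD_none]
theorem rules_food : (pvRules.get? "food").getD [] =
    [ ([["experience", "tour"]], "Culinary Experiences and Food Tours"),
      ([["dish", "traditional"]], "Regional Cuisine and Traditional Dishes"),
      ([["restaurant", "dining"]], "Dining Guide and Restaurant Recommendations") ] := rfl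
theorem rules_tips : (pvRules.get? "tips").getD [] =
    [ ([["packing"]], "Comprehensive Packing Guide and Travel Tips"),
      ([["budget", "money"]], "Budget Planning and Money-Saving Tips"),
      ([["transport", "travel"]], "Transportation and Getting Around") ] := rfl
theorem rules_cities : (pvRules.get? "cities").getD [] =
    [ ([["attraction"]], "Major City Attractions and Landmarks"),
      ([["experience", "local"]], "Authentic Local Experiences and Culture"),
      ([["artistic", "art"]], "Art Districts and Cultural Neighborhoods") ] := rfl
theorem rules_history : (pvRules.get? "history").getD [] =
    [ ([["montpellier"]], "Historical Landmarks in Montpellier"),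
      ([["aix", "provence"]], "Historical Sites in Aix-en-Provence"),
      ([["site"]], "Important Historical Sites and Monuments") ] := rfl

theorem branch_food (cl d : String) :
    (pvFireRules ((pvRules.get? "food").getD []) (pvFeatures cl)).getD d =
    (if PySem.Str.isIn "experience" cl || PySem.Str.isIn "tour" cl then
      "Culinary Experiences and Food Tours"
    else if PySem.Str.isIn "dish" cl || PySem.Str.isIn "traditional" cl then
      "Regional Cuisine and Traditional Dishes"
    else if PySem.Str.isIn "restaurant" cl || PySem.Str.isIn "dining" cl then
      "Dining Guide and Restaurant Recommendations"
    else d) := by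
  simp only [rules_food, pvFireRules, List.all_cons, List.all_nil, List.any_cons,
    List.any_nil, Bool.and_true, Bool.or_false, 
    getD_features, pvContentKeywords, List.mem_cons, List.not_mem_nil, String.reduceEq,
    or_false, or_true,
    apply_ite (fun o : Option String => o.getD d), Option.getD_some, Option.getD_none]

theorem branch_tips (cl d : String) :
    (pvFireRules ((pvRules.get? "tips").getD []) (pvFeatures cl)).getD d =
    (if PySem.Str.isIn "packing" cl then
      "Comprehensive Packing Guide and Travel Tips"
    else if PySem.Str.isIn "budget" cl || PySem.Str.isIn "money" cl then
      "Budget Planning and Money-Saving Tips"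
    else if PySem.Str.isIn "transport" cl || PySem.Str.isIn "travel" cl then
      "Transportation and Getting Around"
    else d) := by
  simp only [rules_tips, pvFireRules, List.all_cons, List.all_nil, List.any_cons,
    List.any_nil, Bool.and_true, Bool.or_false, 
    getD_features, pvContentKeywords, List.mem_cons, List.not_mem_nil, String.reduceEq,
    or_false, or_true,
    apply_ite (fun o : Option String => o.getD d), Option.getD_some, Option.getD_none]

theorem branch_cities (cl d : String) :
    (pvFireRules ((pvRules.get? "cities").getD []) (pvFeatures cl)).getD d =
    (if PySem.Str.isIn "attraction" cl then
      "Major City Attractions and Landmarks"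
    else if PySem.Str.isIn "experience" cl || PySem.Str.isIn "local" cl then
      "Authentic Local Experiences and Culture"
    else if PySem.Str.isIn "artistic" cl || PySem.Str.isIn "art" cl then
      "Art Districts and Cultural Neighborhoods"
    else d) := by
  simp only [rules_cities, pvFireRules, List.all_cons, List.all_nil, List.any_cons,
    List.any_nil, Bool.and_true, Bool.or_false, 
    getD_features, pvContentKeywords, List.mem_cons, List.not_mem_nil, String.reduceEq,
    or_false, or_true,
    apply_ite (fun o : Option String => o.getD d), Option.getD_some, Option.getD_none]

theorem branch_history (cl d : String) :
    (pvFireRules ((pvRules.get? "history").getD []) (pvFeatures cl)).getD d =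
    (if PySem.Str.isIn "montpellier" cl then
      "Historical Landmarks in Montpellier"
    else if PySem.Str.isIn "aix" cl || PySem.Str.isIn "provence" cl then
      "Historical Sites in Aix-en-Provence"
    else if PySem.Str.isIn "site" cl then
      "Important Historical Sites and Monuments"
    else d) := by
  simp only [rules_history, pvFireRules, List.all_cons, List.all_nil, List.any_cons,
    List.any_nil, Bool.and_true, Bool.or_false, 
    getD_features, pvContentKeywords, List.mem_cons, List.not_mem_nil, String.reduceEq,
    or_false, or_true,
    apply_ite (fun o : Option String => o.getD d), Option.getD_some, Option.getD_none]

set_option maxHeartbeats 1000000 in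
theorem main_lemma : ∀ (first_sentence full_para doc_name : String), Dom_generate_specific_section_title_py first_sentence full_para doc_name → Spec_generate_specific_section_title_py first_sentence full_para doc_name (generate_specific_section_title_py first_sentence full_para doc_name) := by
  intro fs fp dn _
  unfold Spec_generate_specific_section_title_py
  simp only [generate_specific_section_title_py, generate_specific_section_title_py_alt,
    pvDocCats, List.find?_cons, List.find?_nil, tail_eq]
  generalize PySem.Str.lower dn = dl
  generalize hcl : PySem.Str.lower fp = cl
  generalize bTail fs fp cl = d
  cases h1 : PySem.Str.isIn "things to do" dl with
  | true => simp only [Bool.true_or, ite_true, Option.map_some, Option.bind_some,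
      branch_act]
  | false =>
  cases h2 : PySem.Str.isIn "activities" dl with
  | true => simp only [Bool.false_or, if_true, Option.map_some,
      Option.bind_some, branch_act]
  | false =>
  cases h3 : PySem.Str.isIn "cuisine" dl with
  | true => simp only [Bool.false_or, Bool.true_or, Bool.false_eq_true, if_true, if_false, 
      Option.map_some, Option.bind_some, branch_food]
  | false =>
  cases h4 : PySem.Str.isIn "food" dl with
  | true => simp only [Bool.false_or, Bool.false_eq_true, if_true, if_false, 
      Option.map_some, Option.bind_some, branch_food]
  | false =>
  cases h5 : PySem.Str.isIn "tips" dl with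
  | true => simp only [Bool.false_or, Bool.true_or, Bool.false_eq_true, if_true, if_false, 
      Option.map_some, Option.bind_some, branch_tips]
  | false =>
  cases h6 : PySem.Str.isIn "tricks" dl with
  | true => simp only [Bool.false_or, Bool.false_eq_true, if_true, if_false, 
      Option.map_some, Option.bind_some, branch_tips]
  | false =>
  cases h7 : PySem.Str.isIn "cities" dl with
  | true => simp only [Bool.false_or, Bool.false_eq_true, if_true, if_false, 
      Option.map_some, Option.bind_some, branch_cities]
  | false =>
  cases h8 : PySem.Str.isIn "history" dl with
  | true => simp only [Bool.false_or, Bool.false_eq_true, if_true, if_false, 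
      Option.map_some, Option.bind_some, branch_history]
  | false => simp only [Bool.false_or, Bool.false_eq_true, if_false, 
      Option.map_none, Option.bind_none, Option.getD_none]

-- ===== VERDICT (by name: the statement is the Claim_ definition above) =====
theorem generate_specific_section_title_py_spec : Claim_equal_generate_specific_section_title_py := by
  intro fs fp dn h
  exact main_lemma fs fp dn h
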